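-- pv_equiv track=rewrite | github.com/DemianSespere/Algoritmos1 | PARCIALES-PYTHON/SIMULACRO.PY | viajes_por_dia
-- ===== SOURCE A (Python) =====
-- def viajes_por_dia(viajes_diarios: dict[int,list[str]],usuarios:list[str])-> dict[str,int]:
--     listas_de_pasajes = viajes_diarios.values()
--
--     pasajeros:dict[str,int] = {}
--     contador:int = 0
--     for i in range(0,(len(usuarios))):
--         for dia in listas_de_pasajes:
--             if (usuarios[i]) in dia:
--                 contador+=1
--         pasajeros[usuarios[i]]=contador
--         contador = 0
--     return pasajeros
-- ===== SOURCE B (Python) =====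
-- def viajes_por_dia(viajes_diarios: dict[int, list[str]], usuarios: list[str]) -> dict[str, int]:
--     counts: dict[str, int] = {}
--     for dia in viajes_diarios.values():
--         for u in set(dia):
--             counts[u] = counts.get(u, 0) + 1
--     return {u: counts.get(u, 0) for u in usuarios}
-- ===== Notes on version B (the rewrite author's own statement) =====
-- stated objective: faster
-- what changed: Inverts the loop nesting: one pass over the days builds a per-user count table (dedup each day via set), then a single lookup pass over usuarios, instead of rescanning every day's list for each user.
import Mathlib
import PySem

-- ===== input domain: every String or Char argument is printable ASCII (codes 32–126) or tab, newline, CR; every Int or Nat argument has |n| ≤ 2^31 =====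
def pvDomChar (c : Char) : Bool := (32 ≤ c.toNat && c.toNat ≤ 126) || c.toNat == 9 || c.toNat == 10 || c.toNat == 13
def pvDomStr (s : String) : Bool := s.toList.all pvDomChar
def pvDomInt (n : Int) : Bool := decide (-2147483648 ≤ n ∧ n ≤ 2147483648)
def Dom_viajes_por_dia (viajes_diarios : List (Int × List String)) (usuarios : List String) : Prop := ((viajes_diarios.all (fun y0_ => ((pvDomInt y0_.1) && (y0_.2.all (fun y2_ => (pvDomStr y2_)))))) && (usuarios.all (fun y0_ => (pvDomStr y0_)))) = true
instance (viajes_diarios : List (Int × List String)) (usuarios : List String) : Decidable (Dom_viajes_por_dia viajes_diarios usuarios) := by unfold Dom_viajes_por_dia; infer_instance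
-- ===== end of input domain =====

-- B inverts the loop nesting: one pass over the days builds a per-user count table, then one lookup pass over usuarios (faster: no rescan of all days per user).

-- ===== PORT A =====
def viajes_por_dia (viajes_diarios : List (Int × List String)) (usuarios : List String) : List (String × Int) :=
  let listas_de_pasajes := (PySem.Dict.ofList viajes_diarios).values
  let st := (PySem.List.pyRange 0 (usuarios.length : Int) 1).foldl
    (fun (st : PySem.Dict String Int × Int) i =>
      let contador := listas_de_pasajes.foldl
        (fun c dia => if PySem.List.pyGetD usuarios i "" ∈ dia then c + 1 else c) st.2
      (st.1.insert (PySem.List.pyGetD usuarios i "") contador, 0))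
    (PySem.Dict.empty, 0)
  st.1.items

-- ===== PORT B =====
def viajes_por_dia_alt (viajes_diarios : List (Int × List String)) (usuarios : List String) : List (String × Int) :=
  let counts := (PySem.Dict.ofList viajes_diarios).values.foldl
    (fun (d : PySem.Dict String Int) dia =>
      (PySem.Set.ofList dia).foldl (fun d u => d.insert u (d.getD u 0 + 1)) d)
    PySem.Dict.empty
  (usuarios.foldl (fun (r : PySem.Dict String Int) u => r.insert u (counts.getD u 0))
    PySem.Dict.empty).items

-- ===== PRECONDITION & SPEC =====
def Spec_viajes_por_dia (viajes_diarios : List (Int × List String)) (usuarios : List String) (out : List (String × Int)) : Prop := out = viajes_por_dia_alt viajes_diarios usuarios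
instance (viajes_diarios : List (Int × List String)) (usuarios : List String) (out : List (String × Int)) : Decidable (Spec_viajes_por_dia viajes_diarios usuarios out) := by unfold Spec_viajes_por_dia; infer_instance

-- ===== CLAIM (what is proved, stated in full; the proofs are below) =====
def Claim_equal_viajes_por_dia : Prop := ∀ (viajes_diarios : List (Int × List String)) (usuarios : List String), Dom_viajes_por_dia viajes_diarios usuarios → Spec_viajes_por_dia viajes_diarios usuarios (viajes_por_dia viajes_diarios usuarios)

-- ===== LEMMAS AND PROOFS =====

-- B's inner day loop: inserting u ↦ getD u + 1 over a duplicate-free list adds 1 exactly on its members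
theorem inner_getD (s : List String) (hs : s.Nodup) (d : PySem.Dict String Int) (x : String) :
    (s.foldl (fun d u => d.insert u (d.getD u 0 + 1)) d).getD x 0 =
      d.getD x 0 + (if x ∈ s then 1 else 0) := by
  induction s generalizing d with
  | nil => simp
  | cons a s ih =>
    rcases List.nodup_cons.mp hs with ⟨ha, hs'⟩
    simp only [List.foldl_cons, ih hs']
    by_cases hx : x = a
    · subst hx
      simp [PySem.Dict.getD_insert_self, ha]
    · rw [PySem.Dict.getD_insert_of_ne]
      · simp [hx]
      · exact hx

-- B's count table: getD reads off the number of days containing x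
theorem counts_getD (ls : List (List String)) (d : PySem.Dict String Int) (x : String) :
    (ls.foldl (fun d dia => (PySem.Set.ofList dia).foldl (fun d u => d.insert u (d.getD u 0 + 1)) d) d).getD x 0 =
      d.getD x 0 + (ls.countP (fun dia => decide (x ∈ dia)) : Int) := by
  induction ls generalizing d with
  | nil => simp
  | cons dia ls ih =>
    simp only [List.foldl_cons, ih, inner_getD _ (PySem.Set.nodup_ofList dia),
      PySem.Set.mem_ofList, List.countP_cons]
    by_cases h : x ∈ dia <;> simp [h]; ring

-- A's outer loop (with the contador-reset pair state) equals a plain insert-per-user fold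
theorem a_fold (ls : List (List String)) (us : List String) (pas : PySem.Dict String Int) :
    (us.foldl
      (fun (st : PySem.Dict String Int × Int) u =>
        (st.1.insert u (ls.foldl (fun c dia => if u ∈ dia then c + 1 else c) st.2), 0))
      (pas, 0)).1 =
    us.foldl (fun r u => r.insert u ((ls.countP (fun dia => decide (u ∈ dia)) : Int))) pas := by
  induction us generalizing pas with
  | nil => rfl
  | cons u us ih =>
    simp only [List.foldl_cons, ih]
    rw [PySem.List.foldl_ite_add_one]
    simp

-- ===== VERDICT (by name: the statement is the Claim_ definition above) =====
theorem viajes_por_dia_spec : Claim_equal_viajes_por_dia := by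
  intro vd us _
  unfold Spec_viajes_por_dia viajes_por_dia viajes_por_dia_alt
  simp only []
  rw [PySem.List.foldl_pyRange_zero_pyGetD' us ""
    (fun (st : PySem.Dict String Int × Int) u =>
      (st.1.insert u (((PySem.Dict.ofList vd).values).foldl
        (fun c dia => if u ∈ dia then c + 1 else c) st.2), 0))
    (PySem.Dict.empty, 0)]
  rw [a_fold]
  congr 1
  apply PySem.List.foldl_congr_mem
  intro acc x _
  rw [counts_getD]
  simp
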